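-- pv_equiv track=rewrite | github.com/ravinewaters/RLmusic | preprocess.py | make_action_by_duration_dict
-- ===== SOURCE A (Python) =====
-- def make_flat_list(list_of_lists):
--     flat_list = [item for lists in list_of_lists for item in lists]
--     return flat_list
--
-- def make_action_by_duration_dict(list_of_song_states, actions_dict):
--     # need to convert action to int first using map_tuples_to_int
--     # then separate each action according to its duration
--     flat_states = make_flat_list(list_of_song_states)
--     action_set_by_duration = {}
--     for state in flat_states:
--         if state[1] != 'pickup':
--             if state[2] in action_set_by_duration:
--                     action_set_by_duration[state[2]].append(
--                         actions_dict[0][state[:2]])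
--             else:
--                 action_set_by_duration[state[2]] = [
--                     actions_dict[0][state[:2]]]
--     for key in action_set_by_duration:
--         action_set_by_duration[key] = set(action_set_by_duration[key])
--     return action_set_by_duration
-- ===== SOURCE B (Python) =====
-- def make_action_by_duration_dict(list_of_song_states, actions_dict):
--     # two-phase group-by: filter once, list the distinct durations in first-
--     # appearance order, then build each duration's set by its own scan
--     flat = [s for song in list_of_song_states for s in song if s[1] != 'pickup']
--     return {dur: {actions_dict[0][s[:2]] for s in flat if s[2] == dur}
--             for dur in dict.fromkeys(s[2] for s in flat)}
-- ===== Notes on version B (the rewrite author's own statement) =====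
-- stated objective: alternative
-- what changed: B replaces A's single-pass hash-bucketing (grow a list per duration, then a finalize pass converting lists to sets) by a key-major group-by: filter the flattened states once, list the distinct durations via dict.fromkeys, and build each duration's set with its own scan over the filtered list.
import Mathlib
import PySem

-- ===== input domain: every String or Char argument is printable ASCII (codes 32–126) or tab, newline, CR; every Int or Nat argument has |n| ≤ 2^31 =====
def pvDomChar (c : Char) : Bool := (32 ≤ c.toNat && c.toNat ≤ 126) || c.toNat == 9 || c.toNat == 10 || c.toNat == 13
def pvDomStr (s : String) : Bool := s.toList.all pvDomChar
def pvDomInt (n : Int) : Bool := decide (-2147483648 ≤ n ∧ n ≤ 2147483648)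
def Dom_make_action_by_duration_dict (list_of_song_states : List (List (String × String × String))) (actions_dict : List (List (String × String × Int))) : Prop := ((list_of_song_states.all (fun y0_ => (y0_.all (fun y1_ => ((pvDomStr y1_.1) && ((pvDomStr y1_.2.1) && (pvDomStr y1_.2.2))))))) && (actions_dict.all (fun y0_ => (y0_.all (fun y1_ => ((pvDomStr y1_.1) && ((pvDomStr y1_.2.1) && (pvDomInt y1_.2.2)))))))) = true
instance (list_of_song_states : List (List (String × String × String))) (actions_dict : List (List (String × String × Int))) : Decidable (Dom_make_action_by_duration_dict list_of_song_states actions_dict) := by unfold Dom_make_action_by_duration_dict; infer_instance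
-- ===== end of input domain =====

-- B replaces A's single-pass hash bucketing + finalize pass by a key-major group-by:
-- filter once, list the distinct durations, then one scan per duration (objective: alternative).

-- ===== PORT A =====
-- A-side helper: actions_dict[0] viewed as the Python dict {(a,b): v}; lookup with default 0 (Pre_ guarantees the key is present)
def lookupActA (row : List (String × String × Int)) (a b : String) : Int :=
  (PySem.Dict.ofList (row.map (fun t => ((t.1, t.2.1), t.2.2)))).getD (a, b) 0

def make_flat_list {α : Type} (list_of_lists : List (List α)) : List α :=
  list_of_lists.foldl (fun acc lists => acc ++ lists) []

def make_action_by_duration_dict (list_of_song_states : List (List (String × String × String))) (actions_dict : List (List (String × String × Int))) : List (String × List Int) :=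
  let flat_states := make_flat_list list_of_song_states
  let row := PySem.List.pyGetD actions_dict 0 []   -- actions_dict[0]; total form, Pre_ demands the lookups succeed
  let action_set_by_duration : PySem.Dict String (List Int) :=
    flat_states.foldl (fun d state =>
      if state.2.1 != "pickup" then
        if d.contains state.2.2 then
          d.modify state.2.2 [] (fun l => l ++ [lookupActA row state.1 state.2.1])
        else
          d.insert state.2.2 [lookupActA row state.1 state.2.1]
      else d) PySem.Dict.empty
  -- for key in ...: d[key] = set(d[key])  (in-place, keeps key order)
  (action_set_by_duration.items.map (fun kv => (kv.1, PySem.Set.ofList kv.2)))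

-- ===== PORT B =====
-- B-side helper: actions_dict[0][state[:2]]
def lookupActB (row : List (String × String × Int)) (a b : String) : Int :=
  (PySem.Dict.ofList (row.map (fun t => ((t.1, t.2.1), t.2.2)))).getD (a, b) 0

def make_action_by_duration_dict_alt (list_of_song_states : List (List (String × String × String))) (actions_dict : List (List (String × String × Int))) : List (String × List Int) :=
  -- flat = [s for song in list_of_song_states for s in song if s[1] != 'pickup']
  let flat := list_of_song_states.flatten.filter (fun s => s.2.1 != "pickup")
  -- {dur: {actions_dict[0][s[:2]] for s in flat if s[2] == dur} for dur in dict.fromkeys(s[2] for s in flat)}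
  (PySem.List.dedup (flat.map (fun s => s.2.2))).map (fun dur =>
    (dur, PySem.Set.ofList ((flat.filter (fun s => s.2.2 == dur)).map
      (fun s => lookupActB (PySem.List.pyGetD actions_dict 0 []) s.1 s.2.1))))

-- ===== PRECONDITION & SPEC =====
-- Pre_ excludes exactly the inputs on which Python A raises: some non-pickup state exists whose
-- (first,second) key is absent from actions_dict[0] (KeyError; IndexError when actions_dict = []). B raises there too.
def Pre_make_action_by_duration_dict (list_of_song_states : List (List (String × String × String))) (actions_dict : List (List (String × String × Int))) : Prop :=
  (list_of_song_states.all (fun song => song.all (fun st =>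
      st.2.1 == "pickup" ||
      (actions_dict.headD []).any (fun t => t.1 == st.1 && t.2.1 == st.2.1)))) = true
instance (list_of_song_states : List (List (String × String × String))) (actions_dict : List (List (String × String × Int))) : Decidable (Pre_make_action_by_duration_dict list_of_song_states actions_dict) := by unfold Pre_make_action_by_duration_dict; infer_instance

def pvWitness_make_action_by_duration_dict : (List (List (String × String × String))) × (List (List (String × String × Int))) :=
  ([[("a", "b", "q"), ("a", "pickup", "r")]], [[("a", "b", 3)]])

def Spec_make_action_by_duration_dict (list_of_song_states : List (List (String × String × String))) (actions_dict : List (List (String × String × Int))) (out : List (String × List Int)) : Prop := out = make_action_by_duration_dict_alt list_of_song_states actions_dict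
instance (list_of_song_states : List (List (String × String × String))) (actions_dict : List (List (String × String × Int))) (out : List (String × List Int)) : Decidable (Spec_make_action_by_duration_dict list_of_song_states actions_dict out) := by unfold Spec_make_action_by_duration_dict; infer_instance

-- ===== CLAIM (what is proved, stated in full; the proofs are below) =====
def Claim_equal_make_action_by_duration_dict : Prop := ∀ (list_of_song_states : List (List (String × String × String))) (actions_dict : List (List (String × String × Int))), Dom_make_action_by_duration_dict list_of_song_states actions_dict → Pre_make_action_by_duration_dict list_of_song_states actions_dict → Spec_make_action_by_duration_dict list_of_song_states actions_dict (make_action_by_duration_dict list_of_song_states actions_dict)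

-- ===== LEMMAS AND PROOFS =====

theorem foldl_append_acc {α : Type} (l : List (List α)) (acc : List α) :
    l.foldl (fun acc lists => acc ++ lists) acc = acc ++ l.flatten := by
  induction l generalizing acc with
  | nil => simp
  | cons x xs ih => simp [ih]

theorem flat_list_eq {α : Type} (l : List (List α)) : make_flat_list l = l.flatten := by
  simpa using foldl_append_acc l []

-- A's bucketing step is a plain 'modify' (insert of a fresh key is modify with default [])
theorem stepA_eq_modify (row : List (String × String × Int)) (d : PySem.Dict String (List Int))
    (st : String × String × String) :
    (if d.contains st.2.2 then
        d.modify st.2.2 [] (fun l => l ++ [lookupActA row st.1 st.2.1])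
      else d.insert st.2.2 [lookupActA row st.1 st.2.1])
    = d.modify st.2.2 [] (fun l => l ++ [lookupActA row st.1 st.2.1]) := by
  by_cases h : d.contains st.2.2 = true
  · rw [if_pos h]
  · rw [if_neg h]
    have hg : d.getD st.2.2 [] = [] :=
      PySem.Dict.getD_of_not_contains d [] (by simpa using h)
    simp [PySem.Dict.modify, hg]

-- ===== VERDICT (by name: the statement is the Claim_ definition above) =====
theorem make_action_by_duration_dict_spec : Claim_equal_make_action_by_duration_dict := by
  intro lss ad _ _
  unfold Spec_make_action_by_duration_dict
  unfold make_action_by_duration_dict make_action_by_duration_dict_alt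
  simp only [flat_list_eq]
  set row := PySem.List.pyGetD ad 0 [] with hrow
  set flat := lss.flatten.filter (fun s => s.2.1 != "pickup") with hflat
  -- A's fold: guard = filter, then step = modify, then reindex over key/value pairs
  have h1 : lss.flatten.foldl (fun d state =>
      if state.2.1 != "pickup" then
        if d.contains state.2.2 then
          d.modify state.2.2 [] (fun l => l ++ [lookupActA row state.1 state.2.1])
        else d.insert state.2.2 [lookupActA row state.1 state.2.1]
      else d) PySem.Dict.empty
      = flat.foldl (fun d st => d.modify st.2.2 [] (fun l => l ++ [lookupActA row st.1 st.2.1]))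
          PySem.Dict.empty := by
    rw [hflat, List.foldl_filter]
    congr 1
    funext d st
    by_cases h : st.2.1 != "pickup"
    · rw [if_pos h, if_pos h, stepA_eq_modify]
    · rw [if_neg h, if_neg h]
  rw [h1]
  -- the modify fold seen as a fold over (key, value) pairs
  have h2 : flat.foldl (fun d st => d.modify st.2.2 [] (fun l => l ++ [lookupActA row st.1 st.2.1]))
        PySem.Dict.empty
      = (flat.map (fun st => (st.2.2, lookupActA row st.1 st.2.1))).foldl
          (fun d p => d.modify p.1 [] (fun l => l ++ [p.2])) PySem.Dict.empty := by
    rw [List.foldl_map]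
  rw [h2]
  set pairs := flat.map (fun st => (st.2.2, lookupActA row st.1 st.2.1)) with hpairs
  set D := pairs.foldl (fun d p => d.modify p.1 [] (fun l => l ++ [p.2])) PySem.Dict.empty with hD
  have hnd : D.keys.Nodup := by
    rw [hD]
    exact PySem.Dict.nodup_keys_foldl_modify_key pairs Prod.fst [] (fun d p => (fun l => l ++ [p.2]))
      PySem.Dict.empty PySem.Dict.nodup_keys_empty
  have hkeys : D.keys = PySem.List.dedup (flat.map (fun s => s.2.2)) := by
    rw [hD, PySem.Dict.keys_foldl_modify_key, PySem.List.dedup_eq_ofList]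
    simp [hpairs, List.map_map, Function.comp_def, PySem.Set.update, PySem.Dict.keys_empty,
      PySem.Set.ofList_eq_foldl]
  have hval : ∀ k, D.getD k [] = (pairs.filter (fun p => p.1 == k)).map (·.2) := by
    intro k
    rw [hD, PySem.Dict.getD_foldl_modify_append, PySem.Dict.getD_empty]
    simp
  rw [PySem.Dict.items_eq_map_keys D hnd [], hkeys, List.map_map]
  refine List.map_congr_left (fun k _ => ?_)
  simp only [Function.comp_def, hval k, hpairs, List.filter_map, List.map_map]
  rfl
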